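-- pv_equiv track=rewrite | github.com/julianfox8/2022-DSGRN-Phenotypes-Yeast | src/scripts/func_pheno_III_overall_fp.py | query_filter
-- ===== SOURCE A (Python) =====
-- def query_filter(unfiltered_l):
--     '''
--     Given a list of tuples containing a fixed point (FP) label and a DSGRN parameter index, this function filters the FP labels, grabs the parameter indices corrseponding to the FP of interest and stores this data in a dictionary. The FP label of interest is 'FP { 0-1, 0, 2, 0-2, 1 }'. The dictionary that is compiled has keys containing FP labels and values containing DSGRN parameters corresponding to each FP label, respectively.
--     '''
--     filtered_l = {}
--     for k,v in unfiltered_l.items():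
--         if v.startswith("FP { 2") or v.startswith("FP { 3")or v.startswith("FP { 1"):
--             pass
--         elif v.endswith(", 0 }"):
--             pass
--         elif v not in filtered_l:
--             filtered_l[v] = [k]
--         else:
--             filtered_l[v].append(k)
--     return filtered_l
-- ===== SOURCE B (Python) =====
-- def query_filter(unfiltered_l):
--     '''Filter-then-group: keep surviving (k, v) pairs in one comprehension,
--     list the distinct surviving labels in first-occurrence order, then build
--     each label's parameter list by a per-label scan of the kept pairs.'''
--     pairs = [(k, v) for k, v in unfiltered_l.items()
--              if not (v.startswith(("FP { 2", "FP { 3", "FP { 1"))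
--                      or v.endswith(", 0 }"))]
--     labels = list(dict.fromkeys(v for _, v in pairs))
--     return {v: [k for k, w in pairs if w == v] for v in labels}
-- ===== Notes on version B (the rewrite author's own statement) =====
-- stated objective: alternative
-- what changed: Replaces A's single-pass incremental dict building (insert-or-append per element) with a filter-then-group decomposition: one comprehension keeps surviving pairs, the distinct labels are listed in first-occurrence order via dict.fromkeys, and each label's list is built by a per-label scan of the kept pairs.
import Mathlib
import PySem

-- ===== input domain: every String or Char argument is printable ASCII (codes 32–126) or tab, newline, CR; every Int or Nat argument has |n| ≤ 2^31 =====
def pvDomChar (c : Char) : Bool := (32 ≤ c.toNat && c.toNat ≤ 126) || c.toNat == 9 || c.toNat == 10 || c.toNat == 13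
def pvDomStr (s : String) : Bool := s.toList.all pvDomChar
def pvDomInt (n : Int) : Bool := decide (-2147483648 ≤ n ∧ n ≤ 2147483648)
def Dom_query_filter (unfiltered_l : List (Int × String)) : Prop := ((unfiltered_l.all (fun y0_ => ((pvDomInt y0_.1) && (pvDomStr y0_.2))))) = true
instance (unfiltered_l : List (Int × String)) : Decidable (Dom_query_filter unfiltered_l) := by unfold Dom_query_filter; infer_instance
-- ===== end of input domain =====

-- B replaces A's single-pass incremental dict grouping by a filter-then-group
-- decomposition (kept pairs, distinct labels in first-occurrence order, one
-- per-label scan); same return value, no speed claim.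


-- ===== PORT A =====
-- loop body of A: the three startswith tests, the endswith test, then
-- 'v not in filtered_l' → new singleton entry, else append to the entry in place
def qfStepA (d : PySem.Dict String (List Int)) (kv : Int × String) : PySem.Dict String (List Int) :=
  if PySem.Str.startswith kv.2 "FP { 2" || PySem.Str.startswith kv.2 "FP { 3" || PySem.Str.startswith kv.2 "FP { 1" then d
  else if PySem.Str.endswith kv.2 ", 0 }" then d
  else if !(d.contains kv.2) then d.insert kv.2 [kv.1]
  else d.modify kv.2 [] (fun l => l ++ [kv.1])

def query_filter (unfiltered_l : List (Int × String)) : List (String × List Int) :=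
  (unfiltered_l.foldl qfStepA PySem.Dict.empty).items

-- ===== PORT B =====
def qfKeep (v : String) : Bool :=
  !(PySem.Str.startswith v "FP { 2" || PySem.Str.startswith v "FP { 3" || PySem.Str.startswith v "FP { 1"
    || PySem.Str.endswith v ", 0 }")

def query_filter_alt (unfiltered_l : List (Int × String)) : List (String × List Int) :=
  let pairs := unfiltered_l.filter (fun kv => qfKeep kv.2)
  let labels := PySem.List.dedup (pairs.map (fun kv => kv.2))
  labels.map (fun v => (v, (pairs.filter (fun kv => kv.2 == v)).map (fun kv => kv.1)))

-- ===== PRECONDITION & SPEC =====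
def Spec_query_filter (unfiltered_l : List (Int × String)) (out : List (String × List Int)) : Prop := out = query_filter_alt unfiltered_l
instance (unfiltered_l : List (Int × String)) (out : List (String × List Int)) : Decidable (Spec_query_filter unfiltered_l out) := by unfold Spec_query_filter; infer_instance

-- ===== CLAIM (what is proved, stated in full; the proofs are below) =====
def Claim_equal_query_filter : Prop := ∀ (unfiltered_l : List (Int × String)), Dom_query_filter unfiltered_l → Spec_query_filter unfiltered_l (query_filter unfiltered_l)

-- ===== LEMMAS AND PROOFS =====

lemma find_of_nodup (its : List (String × List Int)) (p : String × List Int)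
    (hnd : (its.map Prod.fst).Nodup) (hp : p ∈ its) :
    its.find? (fun q => q.1 == p.1) = some p := by
  induction its with
  | nil => cases hp
  | cons e its ih =>
    simp only [List.map_cons, List.nodup_cons] at hnd
    rcases List.mem_cons.mp hp with h | h
    · subst h; simp [List.find?]
    · have hne : e.1 ≠ p.1 := by
        intro hEq
        exact hnd.1 (hEq ▸ (List.mem_map.mpr ⟨p, h, rfl⟩))
      rw [List.find?]
      have : (e.1 == p.1) = false := by simpa using hne
      rw [this]
      exact ih hnd.2 h
lemma getD_of_mem (d : PySem.Dict String (List Int)) (p : String × List Int)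
    (hnd : (d.items.map Prod.fst).Nodup) (hp : p ∈ d.items) :
    d.getD p.1 [] = p.2 := by
  simp [PySem.Dict.getD, PySem.Dict.get?, find_of_nodup d.items p hnd hp]
lemma items_modify_pos (d : PySem.Dict String (List Int)) (v : String) (k : Int)
    (hnd : (d.items.map Prod.fst).Nodup) (hc : d.contains v = true) :
    (d.modify v [] (fun l => l ++ [k])).items
      = d.items.map (fun e => if e.1 = v then (v, e.2 ++ [k]) else e) := by
  have hc' : d.contains v = true := hc
  simp only [PySem.Dict.modify, PySem.Dict.insert, hc, if_pos]
  apply List.map_congr_left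
  intro p hp
  by_cases h : p.1 = v
  · have hg := getD_of_mem d p hnd hp
    have hb : (p.1 == v) = true := by simpa using h
    rw [hb, if_pos h, ← h, hg]; simp
  · simp [h]
lemma items_modify_neg (d : PySem.Dict String (List Int)) (v : String) (k : Int)
    (hc : d.contains v = false) :
    (d.modify v [] (fun l => l ++ [k])).items = d.items ++ [(v, [k])] := by
  have hg : d.get? v = none := by rw [PySem.Dict.get?_eq_none_iff_contains]; exact hc
  simp [PySem.Dict.modify, PySem.Dict.insert, hc, PySem.Dict.getD, hg]
lemma contains_eq_keys (d : PySem.Dict String (List Int)) (x : String) :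
    d.contains x = (d.items.map Prod.fst).any (fun y => y == x) := by
  rw [PySem.Dict.contains, List.any_map]
  rfl

lemma dedup_cons (v : String) (l : List String) :
    PySem.List.dedup (v :: l) = v :: PySem.List.dedup (l.filter (fun x => !(x == v))) := by
  have key : ∀ (l : List String) (s : List String) (v : String), v ∉ s →
      List.foldl PySem.Set.add (v :: s) l
        = v :: List.foldl PySem.Set.add s (l.filter (fun x => !(x == v))) := by
    intro l
    induction l with
    | nil => intro s v _; rfl
    | cons x l ih =>
      intro s v hv
      simp only [List.foldl_cons, List.filter_cons]
      by_cases hx : (x == v) = true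
      · have : x = v := by simpa using hx
        subst this
        have h1 : PySem.Set.add (x :: s) x = x :: s := by
          simp [PySem.Set.add, PySem.Set.contains]
        rw [hx, h1]
        simp only [Bool.not_true, if_neg, Bool.false_eq_true, not_false_iff]
        exact ih s x hv
      · have hxv : x ≠ v := by simpa using hx
        have h1 : PySem.Set.add (v :: s) x = v :: PySem.Set.add s x := by
          simp [PySem.Set.add, PySem.Set.contains, hxv]
          split <;> simp
        rw [Bool.not_eq_true] at hx
        rw [hx, h1]
        simp only [Bool.not_false, if_pos]
        refine ih _ v ?_
        simp [PySem.Set.add]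
        split
        · exact hv
        · simp [hv, Ne.symm hxv]
  have := key l [] v (by simp)
  simpa [PySem.List.dedup, PySem.Set.ofList, PySem.Set.empty, PySem.Set.add, PySem.Set.contains] using this

def qfGrp (ps : List (Int × String)) (v : String) : List Int :=
  (ps.filter (fun kv => kv.2 == v)).map (fun kv => kv.1)
def qfStepM (d : PySem.Dict String (List Int)) (kv : Int × String) : PySem.Dict String (List Int) :=
  d.modify kv.2 [] (fun l => l ++ [kv.1])

lemma qfGrp_cons (kv : Int × String) (ps : List (Int × String)) (x : String) :
    qfGrp (kv :: ps) x = if kv.2 = x then kv.1 :: qfGrp ps x else qfGrp ps x := by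
  simp only [qfGrp, List.filter_cons]
  by_cases h : kv.2 = x
  · simp [h]
  · simp [h]

lemma main_inv (ps : List (Int × String)) :
    ∀ (d : PySem.Dict String (List Int)), (d.items.map Prod.fst).Nodup →
    (ps.foldl qfStepM d).items
      = d.items.map (fun e => (e.1, e.2 ++ qfGrp ps e.1))
        ++ (PySem.List.dedup ((ps.filter (fun kv => !(d.contains kv.2))).map (fun kv => kv.2))).map
             (fun v => (v, qfGrp ps v)) := by
  induction ps with
  | nil =>
    intro d _
    simp [qfGrp, PySem.List.dedup, PySem.Set.ofList, PySem.Set.empty]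
  | cons kv ps ih =>
    intro d hnd
    obtain ⟨k, v⟩ := kv
    simp only [List.foldl_cons]
    by_cases hc : d.contains v = true
    · -- present key: modify updates in place
      have hitems := items_modify_pos d v k hnd hc
      have hkeys : ((qfStepM d (k, v)).items.map Prod.fst) = d.items.map Prod.fst := by
        rw [qfStepM, hitems, List.map_map]
        apply List.map_congr_left
        intro p _
        by_cases h : p.1 = v <;> simp [h]
      have hcont : ∀ x, (qfStepM d (k, v)).contains x = d.contains x := by
        intro x; rw [contains_eq_keys, contains_eq_keys, hkeys]
      rw [ih _ (by rw [hkeys]; exact hnd)]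
      have hfilt : ps.filter (fun q => !((qfStepM d (k, v)).contains q.2))
          = ps.filter (fun q => !(d.contains q.2)) := by
        apply List.filter_congr; intro q _; rw [hcont]
      have hdrop : ((k, v) :: ps).filter (fun q => !(d.contains q.2))
          = ps.filter (fun q => !(d.contains q.2)) := by
        simp [List.filter_cons, hc]
      rw [hfilt, hdrop]
      congr 1
      · -- old entries chunk
        rw [qfStepM, hitems, List.map_map]
        apply List.map_congr_left
        intro e _
        by_cases h : e.1 = v
        · simp [Function.comp, h, qfGrp_cons]
        · simp [Function.comp, h, qfGrp_cons, Ne.symm h]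
      · -- new labels chunk
        apply List.map_congr_left
        intro x hx
        rw [PySem.List.mem_dedup] at hx
        obtain ⟨q, hq, hqx⟩ := List.mem_map.mp hx
        have hqc : d.contains q.2 = false := by
          have := (List.mem_filter.mp hq).2
          simpa using this
        have hxv : v ≠ x := by
          intro h; rw [hqx, ← h] at hqc; rw [hqc] at hc; cases hc
        rw [qfGrp_cons]
        simp [hxv]
    · -- absent key: modify appends a new entry
      rw [Bool.not_eq_true] at hc
      have hitems := items_modify_neg d v k hc
      have hvk : v ∉ d.items.map Prod.fst := by
        intro hmem
        rw [contains_eq_keys] at hc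
        rw [List.any_eq_false] at hc
        exact (hc v hmem) (by simp)
      have hnd' : (((qfStepM d (k, v)).items.map Prod.fst)).Nodup := by
        rw [qfStepM, hitems]
        simp only [List.map_append, List.map_cons, List.map_nil]
        rw [List.nodup_append]
        refine ⟨hnd, List.nodup_singleton _, ?_⟩
        intro a ha b hb
        rw [List.mem_singleton] at hb
        subst hb
        intro h
        exact hvk (h ▸ ha)
      have hcont : ∀ x, (qfStepM d (k, v)).contains x = (d.contains x || (v == x)) := by
        intro x
        rw [qfStepM]
        simp [PySem.Dict.contains, hitems, List.any_append]
      rw [ih _ hnd']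
      have hkeep : ((k, v) :: ps).filter (fun q => !(d.contains q.2))
          = (k, v) :: ps.filter (fun q => !(d.contains q.2)) := by
        simp [List.filter_cons, hc]
      rw [hkeep]
      simp only [List.map_cons]
      rw [dedup_cons]
      have hfilt : (((ps.filter (fun q => !(d.contains q.2))).map (fun q => q.2)).filter
            (fun x => !(x == v)))
          = (ps.filter (fun q => !((qfStepM d (k, v)).contains q.2))).map (fun q => q.2) := by
        rw [List.filter_map, List.filter_filter]
        congr 1
        apply List.filter_congr
        intro q _
        rw [hcont]
        simp only [Function.comp_apply]
        have hsym : (q.2 == v) = (v == q.2) := by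
          cases h1 : (q.2 == v) <;> cases h2 : (v == q.2) <;> simp_all
        rw [hsym]
        cases (v == q.2) <;> cases d.contains q.2 <;> simp
      rw [← hfilt]
      rw [qfStepM, hitems, List.map_append]
      simp only [List.map_cons, List.map_nil]
      rw [List.append_assoc]
      congr 1
      · -- old entries unchanged by the new label
        apply List.map_congr_left
        intro e he
        have : e.1 ≠ v := by
          intro h
          exact hvk (h ▸ List.mem_map.mpr ⟨e, he, rfl⟩)
        rw [qfGrp_cons]
        simp [Ne.symm this]
      · -- head entry plus the remaining new labels
        simp only [List.singleton_append, List.cons.injEq]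
        constructor
        · rw [qfGrp_cons]
          simp [qfGrp]
        · apply List.map_congr_left
          intro x hx
          rw [PySem.List.mem_dedup] at hx
          have hxv : x ≠ v := by
            have := (List.mem_filter.mp hx).2
            simpa using this
          rw [qfGrp_cons]
          simp [Ne.symm hxv]

-- the uniform modify step equals A's two writing branches behind the keep test
lemma qfStepA_eq (d : PySem.Dict String (List Int)) (kv : Int × String) :
    qfStepA d kv = if qfKeep kv.2 then qfStepM d kv else d := by
  unfold qfStepA qfStepM qfKeep
  cases h1 : (PySem.Str.startswith kv.2 "FP { 2" || PySem.Str.startswith kv.2 "FP { 3" || PySem.Str.startswith kv.2 "FP { 1") with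
  | true => simp
  | false =>
    cases h2 : PySem.Str.endswith kv.2 ", 0 }" with
    | true => simp
    | false =>
      simp only [Bool.or_false, Bool.not_false, if_pos]
      cases hc : d.contains kv.2 with
      | false =>
        have hg : d.get? kv.2 = none := by
          rw [PySem.Dict.get?_eq_none_iff_contains]; simp [hc]
        simp [PySem.Dict.modify, PySem.Dict.getD, hg]
      | true => simp [hc]

lemma foldl_stepA_filter (l : List (Int × String)) (d : PySem.Dict String (List Int)) :
    l.foldl qfStepA d = (l.filter (fun kv => qfKeep kv.2)).foldl qfStepM d := by
  induction l generalizing d with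
  | nil => rfl
  | cons p l ih =>
    simp only [List.foldl_cons, List.filter_cons]
    rw [qfStepA_eq]
    by_cases h : qfKeep p.2 = true <;> simp [h, ih]

theorem qf_eq (l : List (Int × String)) : query_filter l = query_filter_alt l := by
  unfold query_filter query_filter_alt
  rw [foldl_stepA_filter]
  rw [main_inv _ _ (by simp [PySem.Dict.empty])]
  have h1 : (l.filter (fun kv => qfKeep kv.2)).filter
        (fun kv => !((PySem.Dict.empty : PySem.Dict String (List Int)).contains kv.2))
      = l.filter (fun kv => qfKeep kv.2) := by
    apply List.filter_eq_self.mpr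
    intro a _
    simp [PySem.Dict.empty, PySem.Dict.contains]
  simp only [PySem.Dict.empty] at h1 ⊢
  rw [h1]
  simp [qfGrp]

-- ===== VERDICT (by name: the statement is the Claim_ definition above) =====
theorem query_filter_spec : Claim_equal_query_filter := by
  intro l _
  unfold Spec_query_filter
  exact qf_eq l
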